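-- pv_equiv track=rewrite | github.com/jdn63/CARA-template | cara_template/utils/disease_surveillance.py | _determine_strategic_priority
-- ===== SOURCE A (Python) =====
-- from typing import Dict, Any, Tuple, List, Optional
--
-- def _determine_strategic_priority(policy_flags: List[Dict[str, str]]) -> str:
--     """Determine overall strategic priority based on policy flags"""
--
--     if any(flag['level'] == 'EMERGENCY' for flag in policy_flags):
--         return 'EMERGENCY_RESPONSE_REQUIRED'
--     elif any(flag['level'] == 'HIGH_PRIORITY' for flag in policy_flags):
--         return 'HIGH_PRIORITY_INTERVENTION'
--     elif any(flag['level'] == 'MEDIUM_PRIORITY' for flag in policy_flags):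
--         return 'TARGETED_IMPROVEMENTS_NEEDED'
--     elif any(flag['level'] == 'SEASONAL_PRIORITY' for flag in policy_flags):
--         return 'SEASONAL_PLANNING_FOCUS'
--     else:
--         return 'MAINTENANCE_MONITORING'
-- ===== SOURCE B (Python) =====
-- def _determine_strategic_priority(policy_flags):
--     """Determine overall strategic priority based on policy flags"""
--     ranks = {'HIGH_PRIORITY': 3, 'MEDIUM_PRIORITY': 2, 'SEASONAL_PRIORITY': 1}
--     results = ['MAINTENANCE_MONITORING', 'SEASONAL_PLANNING_FOCUS',
--                'TARGETED_IMPROVEMENTS_NEEDED', 'HIGH_PRIORITY_INTERVENTION']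
--     best = 0
--     for flag in policy_flags:
--         level = flag['level']
--         if level == 'EMERGENCY':
--             return 'EMERGENCY_RESPONSE_REQUIRED'
--         r = ranks.get(level, 0)
--         if r > best:
--             best = r
--     return results[best]
-- ===== Notes on version B (the rewrite author's own statement) =====
-- stated objective: alternative
-- what changed: Replaced A's four separate any-scans over the flag list by a single in-order pass keeping a running best rank, with an early return on EMERGENCY.
import Mathlib
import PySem

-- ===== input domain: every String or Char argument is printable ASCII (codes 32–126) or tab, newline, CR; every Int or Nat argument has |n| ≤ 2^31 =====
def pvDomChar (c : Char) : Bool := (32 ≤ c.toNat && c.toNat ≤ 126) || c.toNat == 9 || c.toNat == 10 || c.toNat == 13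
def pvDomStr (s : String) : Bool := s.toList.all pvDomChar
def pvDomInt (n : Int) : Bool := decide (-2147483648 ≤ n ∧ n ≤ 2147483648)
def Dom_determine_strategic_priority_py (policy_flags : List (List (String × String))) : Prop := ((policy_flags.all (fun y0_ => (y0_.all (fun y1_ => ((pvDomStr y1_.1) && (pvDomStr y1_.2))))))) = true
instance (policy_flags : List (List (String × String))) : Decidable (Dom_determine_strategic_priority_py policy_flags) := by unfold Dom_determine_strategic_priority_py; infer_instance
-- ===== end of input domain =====

-- B replaces A's four separate any-scans of the flag list by one in-order pass keeping a
-- running best rank (early return on EMERGENCY); equivalence is about the return value.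

-- shared helper: flag['level'] as an Option (none = KeyError in Python), and its value with
-- a "" default — the default is never reached on inputs satisfying Pre_.
def pvLevel (f : List (String × String)) : String := (List.lookup "level" f).getD ""
def pvHasLevel (f : List (String × String)) : Bool := (List.lookup "level" f).isSome

-- ===== PORT A =====
def determine_strategic_priority_py (policy_flags : List (List (String × String))) : String :=
  if policy_flags.any (fun f => pvLevel f == "EMERGENCY") then "EMERGENCY_RESPONSE_REQUIRED"
  else if policy_flags.any (fun f => pvLevel f == "HIGH_PRIORITY") then "HIGH_PRIORITY_INTERVENTION"
  else if policy_flags.any (fun f => pvLevel f == "MEDIUM_PRIORITY") then "TARGETED_IMPROVEMENTS_NEEDED"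
  else if policy_flags.any (fun f => pvLevel f == "SEASONAL_PRIORITY") then "SEASONAL_PLANNING_FOCUS"
  else "MAINTENANCE_MONITORING"

-- ===== PORT B =====
-- ranks.get(level, 0)
def pvRankOf (level : String) : Nat :=
  (List.lookup level [("HIGH_PRIORITY", 3), ("MEDIUM_PRIORITY", 2), ("SEASONAL_PRIORITY", 1)]).getD 0

def pvResults : List String :=
  ["MAINTENANCE_MONITORING", "SEASONAL_PLANNING_FOCUS", "TARGETED_IMPROVEMENTS_NEEDED", "HIGH_PRIORITY_INTERVENTION"]

def pvAltLoop : List (List (String × String)) → Nat → String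
  | [], best => pvResults.getD best ""
  | f :: rest, best =>
    let level := pvLevel f
    if level == "EMERGENCY" then "EMERGENCY_RESPONSE_REQUIRED"
    else
      let r := pvRankOf level
      pvAltLoop rest (if r > best then r else best)

def determine_strategic_priority_py_alt (policy_flags : List (List (String × String))) : String :=
  pvAltLoop policy_flags 0

-- ===== PRECONDITION & SPEC =====
-- Pre_ excludes exactly the inputs on which Python A raises KeyError: some flag before the
-- first EMERGENCY flag has no 'level' key (B raises there too).
def Pre_determine_strategic_priority_py (policy_flags : List (List (String × String))) : Prop :=
  (∀ f ∈ policy_flags, pvHasLevel f = true) ∨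
  (∃ f ∈ policy_flags.takeWhile pvHasLevel, pvLevel f = "EMERGENCY")
instance (policy_flags : List (List (String × String))) : Decidable (Pre_determine_strategic_priority_py policy_flags) := by unfold Pre_determine_strategic_priority_py; infer_instance

def pvWitness_determine_strategic_priority_py : (List (List (String × String))) :=
  [[("level", "SEASONAL_PRIORITY")], [("level", "MEDIUM_PRIORITY")]]

def Spec_determine_strategic_priority_py (policy_flags : List (List (String × String))) (out : String) : Prop := out = determine_strategic_priority_py_alt policy_flags
instance (policy_flags : List (List (String × String))) (out : String) : Decidable (Spec_determine_strategic_priority_py policy_flags out) := by unfold Spec_determine_strategic_priority_py; infer_instance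

-- ===== CLAIM (what is proved, stated in full; the proofs are below) =====
def Claim_equal_determine_strategic_priority_py : Prop := ∀ (policy_flags : List (List (String × String))), Dom_determine_strategic_priority_py policy_flags → Pre_determine_strategic_priority_py policy_flags → Spec_determine_strategic_priority_py policy_flags (determine_strategic_priority_py policy_flags)

-- ===== LEMMAS AND PROOFS =====

-- maximum rank occurring in the list
def pvMBest (pf : List (List (String × String))) : Nat :=
  pf.foldr (fun f a => max (pvRankOf (pvLevel f)) a) 0

lemma pvRankOf_char (l : String) :
    pvRankOf l = if l = "HIGH_PRIORITY" then 3 else if l = "MEDIUM_PRIORITY" then 2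
      else if l = "SEASONAL_PRIORITY" then 1 else 0 := by
  simp only [pvRankOf, List.lookup]
  by_cases h1 : l = "HIGH_PRIORITY" <;> by_cases h2 : l = "MEDIUM_PRIORITY" <;>
    by_cases h3 : l = "SEASONAL_PRIORITY" <;>
    simp_all [eq_comm, Option.getD] <;>
    simp [beq_eq_false_iff_ne.mpr h1, beq_eq_false_iff_ne.mpr h2, beq_eq_false_iff_ne.mpr h3]

lemma pvMBest_char (pf : List (List (String × String))) :
    pvMBest pf =
      if pf.any (fun f => pvLevel f == "HIGH_PRIORITY") then 3
      else if pf.any (fun f => pvLevel f == "MEDIUM_PRIORITY") then 2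
      else if pf.any (fun f => pvLevel f == "SEASONAL_PRIORITY") then 1 else 0 := by
  induction pf with
  | nil => simp [pvMBest]
  | cons f rest ih =>
    have hstep : pvMBest (f :: rest) = max (pvRankOf (pvLevel f)) (pvMBest rest) := rfl
    rw [hstep, ih, pvRankOf_char (pvLevel f)]
    by_cases h1 : pvLevel f = "HIGH_PRIORITY" <;> by_cases h2 : pvLevel f = "MEDIUM_PRIORITY" <;>
      by_cases h3 : pvLevel f = "SEASONAL_PRIORITY" <;>
      simp_all [List.any_cons, beq_iff_eq] <;> split_ifs <;> omega

lemma pvAltLoop_spec (pf : List (List (String × String))) (best : Nat) :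
    pvAltLoop pf best =
      if pf.any (fun f => pvLevel f == "EMERGENCY") then "EMERGENCY_RESPONSE_REQUIRED"
      else pvResults.getD (max best (pvMBest pf)) "" := by
  induction pf generalizing best with
  | nil => simp [pvAltLoop, pvMBest]
  | cons f rest ih =>
    by_cases hE : pvLevel f = "EMERGENCY"
    · simp [pvAltLoop, hE]
    · have hmax : (if pvRankOf (pvLevel f) > best then pvRankOf (pvLevel f) else best)
          = max best (pvRankOf (pvLevel f)) := by split_ifs <;> omega
      have hstep : pvAltLoop (f :: rest) best
          = pvAltLoop rest (if pvRankOf (pvLevel f) > best then pvRankOf (pvLevel f) else best) := by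
        simp [pvAltLoop, hE]
      have hmb : pvMBest (f :: rest) = max (pvRankOf (pvLevel f)) (pvMBest rest) := rfl
      rw [hstep, hmax, ih, hmb]
      simp [List.any_cons, beq_eq_false_iff_ne.mpr hE, Nat.max_assoc]

theorem determine_strategic_priority_py_spec : Claim_equal_determine_strategic_priority_py := by
  intro pf _ _
  unfold Spec_determine_strategic_priority_py determine_strategic_priority_py_alt
  rw [pvAltLoop_spec, pvMBest_char]
  unfold determine_strategic_priority_py
  by_cases hE : pf.any (fun f => pvLevel f == "EMERGENCY") <;>
    by_cases hH : pf.any (fun f => pvLevel f == "HIGH_PRIORITY") <;>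
    by_cases hM : pf.any (fun f => pvLevel f == "MEDIUM_PRIORITY") <;>
    by_cases hS : pf.any (fun f => pvLevel f == "SEASONAL_PRIORITY") <;>
    simp [hE, hH, hM, hS, pvResults]
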